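-- pv_equiv track=rewrite | github.com/pdp10/sbpipe | sbpipe/trunk/parsing_configfile.py | read_common_config
-- ===== SOURCE A (Python) =====
-- def read_common_config(lines):
--     """
--     Parse the common parameters from the configuration file
--
--     :param lines: the lines to parse.
--     :return: return a tuple containing the common parameters
--     """
--     # default values
--     # Boolean flag
--     generate_data = True
--     # Boolean flag
--     analyse_data = True
--     # Boolean flag
--     generate_report = True
--     # the project directory
--     project_dir = ""
--     # the  model
--     model = "model"
--
--     # Initialises the variables
--     for line in lines:
--         # logger.info(line)
--         if line[0] == "generate_data":
--             generate_data = {'True': True, 'False': False}.get(line[1], False)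
--         elif line[0] == "analyse_data":
--             analyse_data = {'True': True, 'False': False}.get(line[1], False)
--         elif line[0] == "generate_report":
--             generate_report = {'True': True, 'False': False}.get(line[1], False)
--         elif line[0] == "project_dir":
--             project_dir = line[1]
--         elif line[0] == "model":
--             model = line[1]
--
--     return (generate_data, analyse_data, generate_report,
--             project_dir, model)
-- ===== SOURCE B (Python) =====
-- def _find_last(lines, key, default):
--     # first match scanning backwards = last occurrence; stops early
--     for line in reversed(lines):
--         if line[0] == key:
--             return line[1]
--     return default
--
--
-- def _as_bool(v):
--     return {'True': True, 'False': False}.get(v, False)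
--
--
-- def read_common_config(lines):
--     return (_as_bool(_find_last(lines, "generate_data", "True")),
--             _as_bool(_find_last(lines, "analyse_data", "True")),
--             _as_bool(_find_last(lines, "generate_report", "True")),
--             _find_last(lines, "project_dir", ""),
--             _find_last(lines, "model", "model"))
-- ===== Notes on version B (the rewrite author's own statement) =====
-- stated objective: alternative
-- what changed: Replaces A's single forward fold that threads five accumulator variables through an if/elif chain with five independent backward searches (reversed iteration, early exit at the first, i.e. last, occurrence of each key), mapping booleans only at extraction.
import Mathlib
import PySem

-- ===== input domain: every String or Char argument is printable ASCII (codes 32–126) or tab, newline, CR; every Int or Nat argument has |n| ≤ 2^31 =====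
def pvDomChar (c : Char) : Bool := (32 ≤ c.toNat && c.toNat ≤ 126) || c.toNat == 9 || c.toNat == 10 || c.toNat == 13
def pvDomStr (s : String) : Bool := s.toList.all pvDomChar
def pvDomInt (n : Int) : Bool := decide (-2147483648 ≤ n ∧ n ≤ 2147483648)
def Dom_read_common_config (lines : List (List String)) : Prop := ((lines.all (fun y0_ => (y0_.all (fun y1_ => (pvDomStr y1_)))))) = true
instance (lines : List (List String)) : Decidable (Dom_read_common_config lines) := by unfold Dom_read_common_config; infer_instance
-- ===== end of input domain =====

-- B replaces A's single forward fold over five accumulators by five independent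
-- backward searches (last occurrence of each key); objective: alternative, return value only.
-- ===== PORT A =====
-- {'True': True, 'False': False}.get(v, False)  (the same dict literal appears in both Pythons)
def pyTruth (v : String) : Bool :=
  PySem.Dict.getD (PySem.Dict.mk [("True", true), ("False", false)]) v false

def stepA (st : Bool × Bool × Bool × String × String) (line : List String) :
    Bool × Bool × Bool × String × String :=
  let k := (PySem.List.pyGet? line 0).getD ""
  if k = "generate_data" then
    (pyTruth ((PySem.List.pyGet? line 1).getD ""), st.2.1, st.2.2.1, st.2.2.2.1, st.2.2.2.2)
  else if k = "analyse_data" then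
    (st.1, pyTruth ((PySem.List.pyGet? line 1).getD ""), st.2.2.1, st.2.2.2.1, st.2.2.2.2)
  else if k = "generate_report" then
    (st.1, st.2.1, pyTruth ((PySem.List.pyGet? line 1).getD ""), st.2.2.2.1, st.2.2.2.2)
  else if k = "project_dir" then
    (st.1, st.2.1, st.2.2.1, (PySem.List.pyGet? line 1).getD "", st.2.2.2.2)
  else if k = "model" then
    (st.1, st.2.1, st.2.2.1, st.2.2.2.1, (PySem.List.pyGet? line 1).getD "")
  else st

def read_common_config (lines : List (List String)) : Bool × Bool × Bool × String × String :=
  lines.foldl stepA (true, true, true, "", "model")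

-- ===== PORT B =====
-- _find_last: loop over reversed(lines), return line[1] at the first line with line[0] == key
def findLastAux (rev : List (List String)) (key default_ : String) : String :=
  match rev with
  | [] => default_
  | line :: rest =>
    if (PySem.List.pyGet? line 0).getD "" = key then (PySem.List.pyGet? line 1).getD ""
    else findLastAux rest key default_

def findLast (lines : List (List String)) (key default_ : String) : String :=
  findLastAux lines.reverse key default_

def read_common_config_alt (lines : List (List String)) : Bool × Bool × Bool × String × String :=
  (pyTruth (findLast lines "generate_data" "True"),
   pyTruth (findLast lines "analyse_data" "True"),
   pyTruth (findLast lines "generate_report" "True"),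
   findLast lines "project_dir" "",
   findLast lines "model" "model")

-- ===== PRECONDITION & SPEC =====
-- Pre_ excludes exactly the inputs where the Python A raises IndexError: an empty line
-- (line[0]) or a one-element line whose key is one of the five recognized keys (line[1]).
def Pre_read_common_config (lines : List (List String)) : Prop :=
  ∀ line ∈ lines, line ≠ [] ∧
    (line.headD "" ∈ (["generate_data", "analyse_data", "generate_report", "project_dir", "model"] : List String) → 2 ≤ line.length)
instance (lines : List (List String)) : Decidable (Pre_read_common_config lines) := by
  unfold Pre_read_common_config; infer_instance

def pvWitness_read_common_config : List (List String) :=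
  [["generate_data", "False"], ["junk"], ["model", "m1"], ["model", "m2"]]

def Spec_read_common_config (lines : List (List String)) (out : Bool × Bool × Bool × String × String) : Prop := out = read_common_config_alt lines
instance (lines : List (List String)) (out : Bool × Bool × Bool × String × String) : Decidable (Spec_read_common_config lines out) := by unfold Spec_read_common_config; infer_instance

-- ===== CLAIM =====
def Claim_equal_read_common_config : Prop := ∀ (lines : List (List String)), Dom_read_common_config lines → Pre_read_common_config lines → Spec_read_common_config lines (read_common_config lines)

-- ===== LEMMAS AND PROOFS =====

-- generic backward search with a post-map f, used to characterise A's fold per component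
def pickS {α : Type} (rev : List (List String)) (key : String) (f : String → α) (d : α) : α :=
  match rev with
  | [] => d
  | line :: rest =>
    if (PySem.List.pyGet? line 0).getD "" = key then f ((PySem.List.pyGet? line 1).getD "")
    else pickS rest key f d

theorem pickS_append {α : Type} (r : List (List String)) (l : List String)
    (key : String) (f : String → α) (d : α) :
    pickS (r ++ [l]) key f d =
      pickS r key f (if (PySem.List.pyGet? l 0).getD "" = key
                     then f ((PySem.List.pyGet? l 1).getD "") else d) := by
  induction r with
  | nil => rfl
  | cons x xs ih => simp [pickS, ih]

theorem pickS_findLastAux {α : Type} (rev : List (List String)) (key : String)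
    (f : String → α) (d : String) :
    f (findLastAux rev key d) = pickS rev key f (f d) := by
  induction rev with
  | nil => rfl
  | cons x xs ih => simp only [findLastAux, pickS]; split <;> simp [ih]

theorem foldl_stepA_eq (lines : List (List String)) (st : Bool × Bool × Bool × String × String) :
    lines.foldl stepA st =
      (pickS lines.reverse "generate_data" pyTruth st.1,
       pickS lines.reverse "analyse_data" pyTruth st.2.1,
       pickS lines.reverse "generate_report" pyTruth st.2.2.1,
       pickS lines.reverse "project_dir" id st.2.2.2.1,
       pickS lines.reverse "model" id st.2.2.2.2) := by
  induction lines generalizing st with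
  | nil => rfl
  | cons l ls ih =>
    simp only [List.foldl_cons, ih, List.reverse_cons, pickS_append]
    unfold stepA
    split_ifs with h1 h2 h3 h4 h5 <;> simp_all

-- ===== VERDICT =====
theorem read_common_config_spec : Claim_equal_read_common_config := by
  intro lines _ _
  unfold Spec_read_common_config read_common_config read_common_config_alt findLast
  rw [foldl_stepA_eq]
  refine Prod.ext ?_ (Prod.ext ?_ (Prod.ext ?_ (Prod.ext ?_ ?_)))
  · exact (pickS_findLastAux lines.reverse "generate_data" pyTruth "True").symm
  · exact (pickS_findLastAux lines.reverse "analyse_data" pyTruth "True").symm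
  · exact (pickS_findLastAux lines.reverse "generate_report" pyTruth "True").symm
  · exact (pickS_findLastAux lines.reverse "project_dir" id "").symm
  · exact (pickS_findLastAux lines.reverse "model" id "model").symm
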